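-- pv_equiv track=rewrite | github.com/nachiketkanore/advent-of-code-2024 | python/09/sol1.py | check
-- ===== SOURCE A (Python) =====
-- def check(A):
--     last_digit = -1
--     first_dot = -1
--     for i, ch in enumerate(A):
--         if ch == '.':
--             if first_dot == -1: first_dot = i
--         else:
--             last_digit = i
--     return last_digit < first_dot
-- ===== SOURCE B (Python) =====
-- def check(A):
--     try:
--         i = A.index('.')
--     except ValueError:
--         return False
--     return all(x == '.' for x in A[i:])
-- ===== Notes on version B (the rewrite author's own statement) =====
-- stated objective: idiomatic
-- what changed: B locates the first '.' with list.index and then verifies the suffix is all dots, instead of A's single pass tracking last_digit/first_dot indices and comparing them.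
import Mathlib
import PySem

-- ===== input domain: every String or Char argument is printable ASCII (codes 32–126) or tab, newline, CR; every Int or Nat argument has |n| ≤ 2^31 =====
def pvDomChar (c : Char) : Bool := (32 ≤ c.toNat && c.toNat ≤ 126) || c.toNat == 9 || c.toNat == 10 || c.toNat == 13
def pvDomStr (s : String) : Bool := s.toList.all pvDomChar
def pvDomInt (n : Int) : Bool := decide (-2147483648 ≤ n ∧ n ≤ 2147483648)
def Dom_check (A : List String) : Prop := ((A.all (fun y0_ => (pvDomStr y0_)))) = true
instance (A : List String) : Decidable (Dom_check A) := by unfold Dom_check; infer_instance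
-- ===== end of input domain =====

-- B (idiomatic): finds the first '.' with list.index and checks the suffix from it is all dots, instead of A's single pass tracking last_digit/first_dot indices; same O(n) cost.


-- ===== PORT A =====
-- total fold over enumerate tracking (last_digit, first_dot)
def check (A : List String) : Bool :=
  let st := (PySem.List.enumerate A 0).foldl
    (fun (st : Int × Int) p =>
      if p.2 == "." then
        (if st.2 == -1 then (st.1, p.1) else st)
      else (p.1, st.2)) (-1, -1)
  decide (st.1 < st.2)

-- ===== PORT B =====
-- B: find the first '.', then check the whole suffix from it is dots
def check_alt (A : List String) : Bool :=
  match PySem.List.index? A "." with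
  | none => false
  | some i => (A.drop i).all (· == ".")

-- ===== PRECONDITION & SPEC =====
def Spec_check (A : List String) (out : Bool) : Prop := out = check_alt A
instance (A : List String) (out : Bool) : Decidable (Spec_check A out) := by unfold Spec_check; infer_instance

-- ===== CLAIM (what is proved, stated in full; the proofs are below) =====
def Claim_equal_check : Prop := ∀ (A : List String), Dom_check A → Spec_check A (check A)

-- ===== LEMMAS AND PROOFS =====

-- the loop body of A's fold
def pvStep (st : Int × Int) (p : Int × String) : Int × Int :=
  if p.2 == "." then (if st.2 == -1 then (st.1, p.1) else st) else (p.1, st.2)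

lemma check_alt_cons_of_ne (x : String) (xs : List String) (hx : x ≠ ".") :
    check_alt (x :: xs) = check_alt xs := by
  unfold check_alt
  rw [PySem.List.index?_cons_of_ne xs hx]
  cases h : PySem.List.index? xs "." with
  | none => simp
  | some i => simp [List.drop_succ_cons]

-- once first_dot is set (fd ≥ 0), the result holds iff it held already and the rest is all dots
lemma foldl_after (L : List String) (k : Nat) (ld fd : Int)
    (hld : ld < k) (hfd : fd < k) (hfd0 : 0 ≤ fd) :
    (decide (((PySem.List.enumerate L k).foldl pvStep (ld, fd)).1
        < ((PySem.List.enumerate L k).foldl pvStep (ld, fd)).2))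
      = (decide (ld < fd) && L.all (· == ".")) := by
  induction L generalizing k ld with
  | nil => simp [PySem.List.enumerate_nil]
  | cons x xs ih =>
    rw [PySem.List.enumerate_cons,
      show ((k : Int) + 1) = ((k + 1 : Nat) : Int) by push_cast; ring]
    by_cases hx : x = "."
    · have hstep : pvStep (ld, fd) ((k : Int), x) = (ld, fd) := by
        simp only [pvStep, hx]
        rw [if_pos (by simp), if_neg (by simp; omega)]
      rw [List.foldl_cons, hstep, ih (k + 1) ld (by omega) (by omega)]
      simp [hx]
    · have hstep : pvStep (ld, fd) ((k : Int), x) = ((k : Int), fd) := by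
        simp only [pvStep]
        rw [if_neg (by simpa using hx)]
      rw [List.foldl_cons, hstep, ih (k + 1) k (by omega) (by omega)]
      have h2 : decide ((k : Int) < fd) = false := by simp; omega
      have h3 : (x == ".") = false := by simpa using hx
      simp [h2, h3]

-- before any dot was seen (fd = -1), the fold from index k computes check_alt of the rest
lemma foldl_before (L : List String) (k : Nat) (ld : Int)
    (hld : ld < k) (hld1 : -1 ≤ ld) :
    (decide (((PySem.List.enumerate L k).foldl pvStep (ld, -1)).1
        < ((PySem.List.enumerate L k).foldl pvStep (ld, -1)).2))
      = check_alt L := by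
  induction L generalizing k ld with
  | nil =>
    simp [PySem.List.enumerate_nil, check_alt, PySem.List.index?]
    omega
  | cons x xs ih =>
    rw [PySem.List.enumerate_cons,
      show ((k : Int) + 1) = ((k + 1 : Nat) : Int) by push_cast; ring]
    by_cases hx : x = "."
    · have hstep : pvStep (ld, -1) ((k : Int), x) = (ld, (k : Int)) := by
        simp [pvStep, hx]
      rw [List.foldl_cons, hstep,
        foldl_after xs (k + 1) ld k (by omega) (by omega) (by omega)]
      have h1 : decide (ld < (k : Int)) = true := by simp; omega
      have h4 : check_alt (x :: xs) = ((x :: xs).all (· == ".")) := by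
        subst hx
        unfold check_alt
        rw [PySem.List.index?_cons_self]
        simp
      subst hx
      simp [h4, h1]
    · have hstep : pvStep (ld, -1) ((k : Int), x) = ((k : Int), -1) := by
        simp only [pvStep]
        rw [if_neg (by simpa using hx)]
      rw [List.foldl_cons, hstep, ih (k + 1) k (by omega) (by omega)]
      exact (check_alt_cons_of_ne x xs hx).symm

-- ===== VERDICT (by name: the statement is the Claim_ definition above) =====
theorem check_spec : Claim_equal_check := by
  intro A _
  unfold Spec_check check
  exact foldl_before A 0 (-1) (by omega) (by omega)
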